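-- pv_equiv track=rewrite | github.com/juyeonma/python-coding-test-study | Programmers/0608/[PGS]전화번호 목록.py | solution
-- ===== SOURCE A (Python) =====
-- def solution(phone_book):
--     answer = True
--     phone_book.sort(key=lambda x: len(x))
--     dict = {}
--     for i in range(len(phone_book)):
--         dict[phone_book[i]] = 1
--         for j in range(i + 1, len(phone_book)):
--             if phone_book[j][: len(phone_book[i])] in dict:
--                 answer = False
--                 break
--         if not answer:
--             break
--     return answer
-- ===== SOURCE B (Python) =====
-- def solution(phone_book):
--     # hash-set approach: one pass over each number's proper prefixes.
--     # (Note: unlike A, B does not sort phone_book in place; return value is the same.)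
--     s = set(phone_book)
--     if len(s) < len(phone_book):
--         return False
--     for num in phone_book:
--         for k in range(len(num)):
--             if num[:k] in s:
--                 return False
--     return True
-- ===== Notes on version B (the rewrite author's own statement) =====
-- stated objective: alternative
-- what changed: replaces A's sort-by-length plus nested pairwise prefix scan with a single hash set of all numbers, a duplicate check, and one pass checking each number's proper prefixes against the set
import Mathlib
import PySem

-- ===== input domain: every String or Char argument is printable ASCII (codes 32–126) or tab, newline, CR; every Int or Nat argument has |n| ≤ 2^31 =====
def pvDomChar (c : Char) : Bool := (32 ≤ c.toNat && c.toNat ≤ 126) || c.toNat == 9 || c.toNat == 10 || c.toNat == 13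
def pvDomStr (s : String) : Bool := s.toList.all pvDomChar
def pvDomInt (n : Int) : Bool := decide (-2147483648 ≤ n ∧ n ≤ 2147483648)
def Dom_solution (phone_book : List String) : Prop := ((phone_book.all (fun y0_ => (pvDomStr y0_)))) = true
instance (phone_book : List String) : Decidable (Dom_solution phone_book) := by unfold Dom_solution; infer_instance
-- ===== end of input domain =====

-- B replaces A's sort + nested pairwise prefix scan by one hash set, a duplicate check
-- and a single prefix-checking pass (objective: alternative). A sorts phone_book in
-- place; B does not — the equivalence proved here is about the RETURN value only.

-- ===== PORT A =====
-- inner loop: 'for j in range(i+1, len(phone_book)): if phone_book[j][:len(phone_book[i])] in dict: ... break'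
def solAInner (d : PySem.Dict String Int) (n : Int) : List String → Bool
  | [] => false
  | y :: ys =>
    if d.contains (PySem.Str.slice y none (some n)) then true
    else solAInner d n ys

-- outer loop: 'for i in range(len(phone_book)): dict[phone_book[i]] = 1; ...; if not answer: break'
def solAOuter (d : PySem.Dict String Int) : List String → Bool
  | [] => true
  | x :: xs =>
    let d' := d.insert x 1
    if solAInner d' (PySem.Str.len x) xs then false
    else solAOuter d' xs

def solution (phone_book : List String) : Bool :=
  solAOuter PySem.Dict.empty (PySem.List.sorted phone_book (fun s => PySem.Str.len s) false)

-- ===== PORT B =====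
def solution_alt (phone_book : List String) : Bool :=
  let s : PySem.Set String := PySem.Set.ofList phone_book
  if PySem.Set.len s < (phone_book.length : Int) then false
  else
    !(phone_book.any (fun num =>
        (PySem.List.pyRange 0 (PySem.Str.len num)).any (fun k =>
          PySem.Set.contains s (PySem.Str.slice num none (some k)))))

-- ===== PRECONDITION & SPEC =====
def Spec_solution (phone_book : List String) (out : Bool) : Prop := out = solution_alt phone_book
instance (phone_book : List String) (out : Bool) : Decidable (Spec_solution phone_book out) := by unfold Spec_solution; infer_instance

-- ===== CLAIM (what is proved, stated in full; the proofs are below) =====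
def Claim_equal_solution : Prop := ∀ (phone_book : List String), Dom_solution phone_book → Spec_solution phone_book (solution phone_book)

-- ===== LEMMAS AND PROOFS =====

-- "some entry is a prefix of another entry (at a different position)"
def PvBad (l : List String) : Prop :=
  ∃ a b, a ∈ l ∧ b ∈ l.erase a ∧ (a.toList <+: b.toList ∨ b.toList <+: a.toList)

theorem pvBad_perm {l l' : List String} (h : l.Perm l') : PvBad l → PvBad l' := by
  rintro ⟨a, b, ha, hb, hr⟩
  exact ⟨a, b, h.mem_iff.mp ha, (h.erase a).mem_iff.mp hb, hr⟩

theorem pvSlice_toList (y : String) (n : Int) (hn : 0 ≤ n) :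
    (PySem.Str.slice y none (some n)).toList = y.toList.take n.toNat := by
  rw [PySem.Str.toList_slice, PySem.Chars.slice_eq_listSlice, PySem.List.slice_to _ hn]

-- take-|x| of y names x itself when x is a prefix of y
theorem pvTake_of_prefix {x y : String} (h : x.toList <+: y.toList) :
    PySem.Str.slice y none (some (x.toList.length : Int)) = x := by
  rw [← String.toList_inj, pvSlice_toList _ _ (by positivity)]
  simp only [Int.toNat_natCast]
  exact (List.prefix_iff_eq_take.mp h).symm

theorem pvInner_true_iff (d : PySem.Dict String Int) (n : Int) (ys : List String) :
    solAInner d n ys = true ↔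
      ∃ y ∈ ys, d.contains (PySem.Str.slice y none (some n)) = true := by
  induction ys with
  | nil => simp [solAInner]
  | cons y ys ih =>
    by_cases h : d.contains (PySem.Str.slice y none (some n)) = true
    · simp [solAInner, h]
    · simp only [Bool.not_eq_true] at h
      simp [solAInner, h, ih]

def pvInsAll (d : PySem.Dict String Int) (p : List String) : PySem.Dict String Int :=
  p.foldl (fun d x => d.insert x 1) d

theorem pvContains_insAll (d : PySem.Dict String Int) (p : List String) (s : String) :
    (pvInsAll d p).contains s = (d.contains s || decide (s ∈ p)) := by
  induction p generalizing d with
  | nil => simp [pvInsAll]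
  | cons x xs ih =>
    simp only [pvInsAll, List.foldl_cons] at *
    rw [ih, PySem.Dict.contains_insert]
    by_cases hs : s = x
    · subst hs; simp
    · have hb : (s == x) = false := by simp [hs]
      simp [hb, hs, List.mem_cons]

theorem pvOuter_false_iff (d : PySem.Dict String Int) (l : List String) :
    solAOuter d l = false ↔
      ∃ l1 x l2, l = l1 ++ x :: l2 ∧
        ∃ y ∈ l2, (pvInsAll d (l1 ++ [x])).contains
            (PySem.Str.slice y none (some (PySem.Str.len x))) = true := by
  induction l generalizing d with
  | nil =>
    simp only [solAOuter]
    constructor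
    · intro h; exact absurd h (by simp)
    · rintro ⟨l1, x, l2, h, -⟩; exact absurd h (by simp)
  | cons x xs ih =>
    simp only [solAOuter]
    by_cases h : solAInner (d.insert x 1) (PySem.Str.len x) xs = true
    · rw [if_pos h]
      constructor
      · intro _
        rcases (pvInner_true_iff _ _ _).mp h with ⟨y, hy, hc⟩
        exact ⟨[], x, xs, rfl, y, hy, by simpa [pvInsAll] using hc⟩
      · intro _; rfl
    · rw [if_neg h, ih]
      constructor
      · rintro ⟨l1, z, l2, hsplit, y, hy, hc⟩
        exact ⟨x :: l1, z, l2, by simp [hsplit], y, hy, by simpa [pvInsAll] using hc⟩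
      · rintro ⟨l1, z, l2, hsplit, y, hy, hc⟩
        cases l1 with
        | nil =>
          simp only [List.nil_append, List.cons.injEq] at hsplit
          obtain ⟨rfl, rfl⟩ := hsplit
          exact absurd ((pvInner_true_iff _ _ _).mpr ⟨y, hy, by simpa [pvInsAll] using hc⟩) h
        | cons w l1' =>
          simp only [List.cons_append, List.cons.injEq] at hsplit
          obtain ⟨rfl, rfl⟩ := hsplit
          exact ⟨l1', z, l2, rfl, y, hy, by simpa [pvInsAll] using hc⟩

theorem pvPairwise_split {R : String → String → Prop} {p q : List String} {x : String}
    (h : List.Pairwise R (p ++ x :: q)) : ∀ y ∈ q, R x y := by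
  rcases List.pairwise_append.mp h with ⟨-, h2, -⟩
  exact (List.pairwise_cons.mp h2).1

theorem pvA_false_iff (pb : List String) : solution pb = false ↔ PvBad pb := by
  have hperm := PySem.List.sorted_perm pb (fun s => PySem.Str.len s) false
  have hpw := PySem.List.sorted_pairwise pb (fun s => PySem.Str.len s)
  set sl := PySem.List.sorted pb (fun s => PySem.Str.len s) false with hsl
  rw [solution, ← hsl, pvOuter_false_iff]
  constructor
  · rintro ⟨l1, x, l2, hsplit, y, hy, hc⟩
    refine pvBad_perm hperm ?_
    rw [pvContains_insAll] at hc
    simp only [PySem.Dict.contains_empty, Bool.false_or, decide_eq_true_eq] at hc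
    set a := PySem.Str.slice y none (some (PySem.Str.len x)) with hadef
    have hpre : a.toList <+: y.toList := by
      rw [hadef, pvSlice_toList _ _ (by simp [PySem.Str.len_eq])]
      exact List.take_prefix _ _
    refine ⟨a, y, ?_, ?_, Or.inl hpre⟩
    · rw [hsplit]
      rcases List.mem_append.mp hc with h1 | h1
      · exact List.mem_append.mpr (Or.inl h1)
      · simp only [List.mem_singleton] at h1
        simp [h1]
    · have hre : sl.erase a = (l1 ++ [x]).erase a ++ l2 := by
        rw [hsplit, show l1 ++ x :: l2 = (l1 ++ [x]) ++ l2 by simp]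
        exact List.erase_append_left _ hc
      rw [hre]
      exact List.mem_append.mpr (Or.inr hy)
  · intro hbad
    rcases pvBad_perm hperm.symm hbad with ⟨a, b, ha, hb, hr⟩
    rcases List.exists_erase_eq ha with ⟨u, v, hanu, hsplit, herase⟩
    rw [herase] at hb
    rcases List.mem_append.mp hb with hbu | hbv
    · -- b occurs before a in sl : len b ≤ len a, so b is a prefix of a
      rcases List.append_of_mem hbu with ⟨u1, u2, rfl⟩
      have hsl2 : sl = u1 ++ b :: (u2 ++ a :: v) := by simpa using hsplit
      have hlen : b.toList.length ≤ a.toList.length := by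
        have := pvPairwise_split (hsl2 ▸ hpw) a (by simp)
        simpa [PySem.Str.len_eq] using this
      have hpre : b.toList <+: a.toList := by
        rcases hr with h | h
        · rw [List.IsPrefix.eq_of_length_le h hlen]
        · exact h
      refine ⟨u1, b, u2 ++ a :: v, hsl2, a, by simp, ?_⟩
      rw [pvContains_insAll, PySem.Str.len_eq, pvTake_of_prefix hpre]
      simp
    · -- b occurs after a in sl : len a ≤ len b, so a is a prefix of b
      have hlen : a.toList.length ≤ b.toList.length := by
        have := pvPairwise_split (hsplit ▸ hpw) b hbv
        simpa [PySem.Str.len_eq] using this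
      have hpre : a.toList <+: b.toList := by
        rcases hr with h | h
        · exact h
        · rw [List.IsPrefix.eq_of_length_le h hlen]
      refine ⟨u, a, v, hsplit, b, hbv, ?_⟩
      rw [pvContains_insAll, PySem.Str.len_eq, pvTake_of_prefix hpre]
      simp

-- ---- B side ----

theorem pvContains_set (s : PySem.Set String) (x : String) :
    PySem.Set.contains s x = decide (x ∈ s) := by
  simp [PySem.Set.contains]

theorem pvAdd_length (s : PySem.Set String) (x : String) :
    (PySem.Set.add s x).length ≤ s.length + 1 := by
  by_cases h : x ∈ s <;> simp [PySem.Set.add, pvContains_set, h]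

theorem pvFoldlAdd_length_le (xs : List String) (s : PySem.Set String) :
    (xs.foldl PySem.Set.add s).length ≤ s.length + xs.length := by
  induction xs generalizing s with
  | nil => simp
  | cons x xs ih =>
    have h1 := pvAdd_length s x
    have h2 := ih (PySem.Set.add s x)
    simp only [List.foldl_cons, List.length_cons]
    omega

theorem pvFoldlAdd_nodup_eq (xs : List String) (s : PySem.Set String)
    (h : (s ++ xs).Nodup) : xs.foldl PySem.Set.add s = s ++ xs := by
  induction xs generalizing s with
  | nil => simp
  | cons x xs ih =>
    rw [List.nodup_append] at h
    obtain ⟨hs, hxxs, hdisj⟩ := h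
    have hx : x ∉ s := fun hmem => hdisj x hmem x List.mem_cons_self rfl
    have hadd : PySem.Set.add s x = s ++ [x] := by
      simp [PySem.Set.add, pvContains_set, hx]
    rw [List.foldl_cons, hadd, ih (s ++ [x]) ?_, List.append_assoc]
    · rfl
    · rw [List.append_assoc]
      rw [List.nodup_append]
      exact ⟨hs, hxxs, hdisj⟩

theorem pvFoldlAdd_length_lt (xs : List String) (s : PySem.Set String)
    (h : ¬ xs.Nodup ∨ ∃ x ∈ xs, x ∈ s) :
    (xs.foldl PySem.Set.add s).length < s.length + xs.length := by
  induction xs generalizing s with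
  | nil =>
    rcases h with h | ⟨x, hx, -⟩
    · exact absurd List.nodup_nil h
    · exact absurd hx (List.not_mem_nil)
  | cons x xs ih =>
    simp only [List.foldl_cons, List.length_cons]
    by_cases hxs : x ∈ s
    · have hadd : PySem.Set.add s x = s := by
        simp [PySem.Set.add, pvContains_set, hxs]
      rw [hadd]
      have := pvFoldlAdd_length_le xs s
      omega
    · have hadd : PySem.Set.add s x = s ++ [x] := by
        simp [PySem.Set.add, pvContains_set, hxs]
      rw [hadd]
      have hrec : ¬ xs.Nodup ∨ ∃ y ∈ xs, y ∈ s ++ [x] := by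
        rcases h with h | ⟨y, hy, hys⟩
        · rw [List.nodup_cons] at h
          push_neg at h
          by_cases hxx : x ∈ xs
          · exact Or.inr ⟨x, hxx, by simp⟩
          · exact Or.inl (h hxx)
        · rcases List.mem_cons.mp hy with rfl | hy'
          · exact absurd hys hxs
          · exact Or.inr ⟨y, hy', by simp [hys]⟩
      have := ih (s ++ [x]) hrec
      simp only [List.length_append, List.length_singleton] at this
      omega

theorem pvLen_ofList_lt_iff (pb : List String) :
    (PySem.Set.ofList pb).length < pb.length ↔ ¬ pb.Nodup := by
  rw [PySem.Set.ofList_eq_foldl]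
  constructor
  · intro h hnd
    rw [pvFoldlAdd_nodup_eq pb [] (by simpa using hnd)] at h
    simp at h
  · intro h
    have := pvFoldlAdd_length_lt pb [] (Or.inl h)
    simpa using this

theorem pvBad_of_dup (pb : List String) (h : ¬ pb.Nodup) : PvBad pb := by
  rw [List.nodup_iff_count_le_one] at h
  push_neg at h
  rcases h with ⟨a, ha⟩
  have hmem : a ∈ pb := by
    rw [← List.count_pos_iff]; omega
  have herase : a ∈ pb.erase a := by
    rw [← List.count_pos_iff, List.count_erase_self]; omega
  exact ⟨a, a, hmem, herase, Or.inl List.prefix_rfl⟩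

theorem pvBad_of_prefix (pb : List String) (num : String) (hnum : num ∈ pb) (k : Int)
    (h0 : 0 ≤ k) (hk : k < PySem.Str.len num)
    (hp : PySem.Str.slice num none (some k) ∈ pb) : PvBad pb := by
  set p := PySem.Str.slice num none (some k) with hpdef
  have hpl : p.toList = num.toList.take k.toNat := pvSlice_toList num k h0
  have hlen : p.toList.length < num.toList.length := by
    rw [hpl, List.length_take]
    rw [PySem.Str.len_eq] at hk
    omega
  have hne : num ≠ p := by
    intro h; rw [h] at hlen; omega
  refine ⟨p, num, hp, (List.mem_erase_of_ne hne).mpr hnum, Or.inl ?_⟩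
  rw [hpl]; exact List.take_prefix _ _

theorem pvPrefix_of_bad_nodup (pb : List String) (hnd : pb.Nodup) (h : PvBad pb) :
    ∃ num ∈ pb, ∃ k : Int, 0 ≤ k ∧ k < PySem.Str.len num ∧
      PySem.Str.slice num none (some k) ∈ pb := by
  rcases h with ⟨a, b, ha, hb, hr⟩
  have hab : a ≠ b := by
    rintro rfl
    exact hnd.not_mem_erase hb
  have hbm : b ∈ pb := List.mem_of_mem_erase hb
  rcases hr with hpre | hpre
  · have hlt : a.toList.length < b.toList.length := by
      rcases lt_or_eq_of_le hpre.length_le with h | h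
      · exact h
      · exact absurd (String.toList_inj.mp (hpre.eq_of_length_le (le_of_eq h.symm))) hab
    refine ⟨b, hbm, (a.toList.length : Int), by positivity, ?_, ?_⟩
    · rw [PySem.Str.len_eq]; exact_mod_cast hlt
    · rw [pvTake_of_prefix hpre]; exact ha
  · have hlt : b.toList.length < a.toList.length := by
      rcases lt_or_eq_of_le hpre.length_le with h | h
      · exact h
      · exact absurd (String.toList_inj.mp (hpre.eq_of_length_le (le_of_eq h.symm))).symm hab
    refine ⟨a, ha, (b.toList.length : Int), by positivity, ?_, ?_⟩
    · rw [PySem.Str.len_eq]; exact_mod_cast hlt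
    · rw [pvTake_of_prefix hpre]; exact hbm

theorem pvB_false_iff (pb : List String) : solution_alt pb = false ↔ PvBad pb := by
  have hlen : PySem.Set.len (PySem.Set.ofList pb) = ((PySem.Set.ofList pb).length : Int) := by
    simp [PySem.Set.len]
  by_cases hdup : (PySem.Set.ofList pb).length < pb.length
  · have hA : solution_alt pb = false := by
      rw [solution_alt]
      simp only [hlen]
      rw [if_pos (by exact_mod_cast hdup)]
    rw [hA]
    simp only [true_iff]
    exact pvBad_of_dup pb ((pvLen_ofList_lt_iff pb).mp hdup)
  · have hnd : pb.Nodup := by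
      by_contra h
      exact hdup ((pvLen_ofList_lt_iff pb).mpr h)
    have hA : solution_alt pb =
        !(pb.any (fun num =>
          (PySem.List.pyRange 0 (PySem.Str.len num)).any (fun k =>
            PySem.Set.contains (PySem.Set.ofList pb) (PySem.Str.slice num none (some k))))) := by
      rw [solution_alt]
      simp only [hlen]
      rw [if_neg (by exact_mod_cast hdup)]
    rw [hA]
    simp only [Bool.not_eq_false', List.any_eq_true, PySem.List.mem_pyRange_one,
      pvContains_set, decide_eq_true_eq, PySem.Set.mem_ofList]
    constructor
    · rintro ⟨num, hnum, k, ⟨h0, hk⟩, hp⟩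
      exact pvBad_of_prefix pb num hnum k h0 hk hp
    · intro hbad
      rcases pvPrefix_of_bad_nodup pb hnd hbad with ⟨num, hnum, k, h0, hk, hp⟩
      exact ⟨num, hnum, k, ⟨h0, hk⟩, hp⟩

-- ===== VERDICT (by name: the statement is the Claim_ definition above) =====
theorem solution_spec : Claim_equal_solution := by
  intro pb _
  unfold Spec_solution
  have h := (pvA_false_iff pb).trans (pvB_false_iff pb).symm
  cases hA : solution pb <;> cases hB : solution_alt pb <;> simp_all
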